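-- pv_equiv track=rewrite | github.com/ffyuanda/15112-homework | homework/src/hw1-3.py | patternedMessage
-- ===== SOURCE A (Python) =====
-- def getKthCharInfinite(string, number):
--     length = len(string)
--     i = number % length
--     return string[i - 1]
--
-- def patternedMessage(message, pattern):
--     messageMod = message.replace(" ","")
--     length = len(messageMod)
--     output = ""
--     times = 0
--     for i in pattern.splitlines():
--
--         for j in i:
--             if(j != " "):
--                 times += 1
--                 output += getKthCharInfinite(messageMod, times)
--             elif(j == " "):
--                 output += " "#deal with the blank part
--
--         output += "\n"
--     return output.strip("\n")
-- ===== SOURCE B (Python) =====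
-- def patternedMessage(message, pattern):
--     messageMod = message.replace(" ", "")
--     lines = pattern.splitlines()
--     n = sum(1 for line in lines for c in line if c != " ")
--     stream = "" if n == 0 else (messageMod * (n // len(messageMod) + 1))[:n]
--     k = 0
--     out_lines = []
--     for line in lines:
--         chars = []
--         for c in line:
--             if c == " ":
--                 chars.append(" ")
--             else:
--                 chars.append(stream[k])
--                 k += 1
--         out_lines.append("".join(chars))
--     return "\n".join(out_lines).strip("\n")
-- ===== Notes on version B (the rewrite author's own statement) =====
-- stated objective: alternative
-- what changed: A computes each output character on the fly with a modular index into the de-spaced message inside one accumulating pass; B first counts the non-space pattern cells, materialises the whole cycled character stream by string repetition and slicing, then lays it onto the pattern in a second pass that builds the lines as a list joined with newlines.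
import Mathlib
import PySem

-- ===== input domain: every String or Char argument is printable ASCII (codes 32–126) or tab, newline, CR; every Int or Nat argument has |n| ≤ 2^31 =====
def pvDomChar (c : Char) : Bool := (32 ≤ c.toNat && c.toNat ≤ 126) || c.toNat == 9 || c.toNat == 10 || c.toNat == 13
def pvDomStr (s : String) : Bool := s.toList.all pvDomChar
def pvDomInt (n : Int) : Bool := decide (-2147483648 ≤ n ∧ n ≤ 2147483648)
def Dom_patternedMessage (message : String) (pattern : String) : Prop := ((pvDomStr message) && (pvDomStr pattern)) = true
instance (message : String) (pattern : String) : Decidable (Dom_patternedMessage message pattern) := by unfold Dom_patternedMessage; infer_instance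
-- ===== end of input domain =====

-- B recomputes A's output by a two-pass decomposition (count cells, materialise the cycled
-- character stream, then lay it onto the pattern); equivalence is proved on all inputs where
-- the Python A returns (Pre_ excludes exactly its ZeroDivisionError inputs).

-- ===== PORT A =====
-- returns none exactly where the Python helper raises (ZeroDivisionError when the
-- de-spaced message is empty); such inputs are excluded by Pre_ below.
def getKthCharInfinite (string : String) (number : Int) : Option Char :=
  let length : Int := PySem.Str.len string
  (PySem.Int.mod? number length).bind (fun i => PySem.Str.pyGet? string (i - 1))

def pmCharA (messageMod : String) (st : Nat × List Char) (j : Char) : Nat × List Char :=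
  if j ≠ ' ' then
    (st.1 + 1, st.2 ++ [(getKthCharInfinite messageMod ((st.1 : Int) + 1)).getD ' '])
  else
    (st.1, st.2 ++ [' '])

def pmLineA (messageMod : String) (st : Nat × List Char) (line : String) : Nat × List Char :=
  let st2 := line.toList.foldl (pmCharA messageMod) st
  (st2.1, st2.2 ++ ['\n'])

def patternedMessage (message : String) (pattern : String) : String :=
  let messageMod := PySem.Str.replace message " " ""
  let st := (PySem.Str.splitlines pattern).foldl (pmLineA messageMod) (0, [])
  PySem.Str.stripChars (String.ofList st.2) "\n"

-- ===== PORT B =====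
def pmCharB (stream : List Char) (st : Nat × List Char) (c : Char) : Nat × List Char :=
  if c = ' ' then
    (st.1, st.2 ++ [' '])
  else
    (st.1 + 1, st.2 ++ [stream.getD st.1 ' '])

def pmLineB (stream : List Char) (st : Nat × List String) (line : String) : Nat × List String :=
  let cs := line.toList.foldl (pmCharB stream) (st.1, [])
  (cs.1, st.2 ++ [String.ofList cs.2])

def patternedMessage_alt (message : String) (pattern : String) : String :=
  let messageMod := (PySem.Str.replace message " " "").toList
  let lines := PySem.Str.splitlines pattern
  let n := (lines.map (fun l => l.toList.countP (fun c => c != ' '))).sum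
  let stream : List Char :=
    if n = 0 then [] else (List.replicate (n / messageMod.length + 1) messageMod).flatten.take n
  let st := lines.foldl (pmLineB stream) (0, [])
  PySem.Str.stripChars (PySem.Str.join "\n" st.2) "\n"

-- ===== PRECONDITION & SPEC =====
-- Pre_ excludes exactly the inputs on which the Python A raises ZeroDivisionError:
-- a message consisting only of spaces while some line of the pattern has a non-space character
-- (the Python B raises there as well).
def Pre_patternedMessage (message : String) (pattern : String) : Prop :=
  PySem.Str.replace message " " "" ≠ "" ∨
    ((PySem.Str.splitlines pattern).all (fun l => l.toList.all (fun c => c == ' '))) = true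
instance (message : String) (pattern : String) : Decidable (Pre_patternedMessage message pattern) := by
  unfold Pre_patternedMessage; infer_instance

def pvWitness_patternedMessage : String × String := ("to be", "** **\n *  *")

def Spec_patternedMessage (message : String) (pattern : String) (out : String) : Prop := out = patternedMessage_alt message pattern
instance (message : String) (pattern : String) (out : String) : Decidable (Spec_patternedMessage message pattern out) := by unfold Spec_patternedMessage; infer_instance

-- ===== CLAIM (what is proved, stated in full; the proofs are below) =====
def Claim_equal_patternedMessage : Prop := ∀ (message : String) (pattern : String), Dom_patternedMessage message pattern → Pre_patternedMessage message pattern → Spec_patternedMessage message pattern (patternedMessage message pattern)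

-- ===== LEMMAS AND PROOFS =====

-- proof-side vocabulary: the number of non-blank cells and the rendered characters of a line,
-- parametric in the source f of substitution characters
def pvCnt (l : List Char) : Nat := l.countP (fun c => c != ' ')

def pvEmit (f : Nat → Char) : Nat → List Char → List Char
  | _, [] => []
  | t, c :: cs => if c = ' ' then ' ' :: pvEmit f t cs else f t :: pvEmit f (t + 1) cs

def pvCntL (ls : List String) : Nat := (ls.map (fun l => l.toList.countP (fun c => c != ' '))).sum

def pvEmitLines (f : Nat → Char) : Nat → List String → List (List Char)
  | _, [] => []
  | t, l :: ls => pvEmit f t l.toList :: pvEmitLines f (t + pvCnt l.toList) ls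

def pvFA (m : String) (t : Nat) : Char := (getKthCharInfinite m ((t : Int) + 1)).getD ' '

def pvFB (stream : List Char) (t : Nat) : Char := stream.getD t ' '

lemma pvCnt_cons (c : Char) (cs : List Char) :
    pvCnt (c :: cs) = pvCnt cs + (if c = ' ' then 0 else 1) := by
  by_cases hc : c = ' ' <;> simp [pvCnt, List.countP_cons, hc]

lemma foldA (m : String) : ∀ (l : List Char) (t : Nat) (out : List Char),
    l.foldl (pmCharA m) (t, out) = (t + pvCnt l, out ++ pvEmit (pvFA m) t l) := by
  intro l
  induction l with
  | nil => intro t out; simp [pvCnt, pvEmit]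
  | cons c cs ih =>
    intro t out
    by_cases hc : c = ' ' <;>
      simp [List.foldl_cons, pmCharA, hc, ih, pvEmit, pvCnt_cons, pvFA] <;> omega

lemma foldB (stream : List Char) : ∀ (l : List Char) (t : Nat) (out : List Char),
    l.foldl (pmCharB stream) (t, out) = (t + pvCnt l, out ++ pvEmit (pvFB stream) t l) := by
  intro l
  induction l with
  | nil => intro t out; simp [pvCnt, pvEmit]
  | cons c cs ih =>
    intro t out
    by_cases hc : c = ' ' <;>
      simp [List.foldl_cons, pmCharB, hc, ih, pvEmit, pvCnt_cons, pvFB] <;> omega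

lemma pvCntL_cons (l : String) (ls : List String) :
    pvCntL (l :: ls) = pvCnt l.toList + pvCntL ls := by
  simp [pvCntL, pvCnt]

lemma foldLinesA (m : String) : ∀ (ls : List String) (t : Nat) (out : List Char),
    ls.foldl (pmLineA m) (t, out) =
      (t + pvCntL ls, out ++ ((pvEmitLines (pvFA m) t ls).map (fun r => r ++ ['\n'])).flatten) := by
  intro ls
  induction ls with
  | nil => intro t out; simp [pvCntL, pvEmitLines]
  | cons l ls ih =>
    intro t out
    rw [List.foldl_cons]
    show ls.foldl (pmLineA m) (pmLineA m (t, out) l) = _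
    simp only [pmLineA, foldA m l.toList t out]
    rw [ih]
    simp [pvEmitLines, pvCntL_cons]
    omega

lemma foldLinesB (stream : List Char) : ∀ (ls : List String) (t : Nat) (acc : List String),
    ls.foldl (pmLineB stream) (t, acc) =
      (t + pvCntL ls, acc ++ (pvEmitLines (pvFB stream) t ls).map String.ofList) := by
  intro ls
  induction ls with
  | nil => intro t acc; simp [pvCntL, pvEmitLines]
  | cons l ls ih =>
    intro t acc
    rw [List.foldl_cons]
    show ls.foldl (pmLineB stream) (pmLineB stream (t, acc) l) = _
    simp only [pmLineB, foldB stream l.toList t []]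
    rw [ih]
    simp [pvEmitLines, pvCntL_cons]
    omega

lemma pvEmit_congr (f g : Nat → Char) : ∀ (l : List Char) (t : Nat),
    (∀ k, t ≤ k → k < t + pvCnt l → f k = g k) → pvEmit f t l = pvEmit g t l := by
  intro l
  induction l with
  | nil => intro t _; rfl
  | cons c cs ih =>
    intro t h
    by_cases hc : c = ' '
    · simp only [pvEmit, if_pos hc]
      exact congrArg _ (ih t (fun k h1 h2 => h k h1 (by rw [pvCnt_cons, if_pos hc]; omega)))
    · simp only [pvEmit, if_neg hc]
      have h1 : f t = g t := h t le_rfl (by rw [pvCnt_cons, if_neg hc]; omega)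
      rw [h1]
      exact congrArg _ (ih (t + 1) (fun k hk1 hk2 => h k (by omega) (by rw [pvCnt_cons, if_neg hc]; omega)))

lemma pvEmitLines_congr (f g : Nat → Char) : ∀ (ls : List String) (t : Nat),
    (∀ k, t ≤ k → k < t + pvCntL ls → f k = g k) → pvEmitLines f t ls = pvEmitLines g t ls := by
  intro ls
  induction ls with
  | nil => intro t _; rfl
  | cons l ls ih =>
    intro t h
    simp only [pvEmitLines]
    rw [pvEmit_congr f g l.toList t (fun k h1 h2 => h k h1 (by rw [pvCntL_cons]; omega))]
    rw [ih (t + pvCnt l.toList) (fun k h1 h2 => h k (by omega) (by rw [pvCntL_cons]; omega))]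

lemma succ_mod (t len : Nat) (h : 0 < len) :
    (t + 1) % len = if t % len + 1 = len then 0 else t % len + 1 := by
  rcases Nat.lt_or_ge 1 len with h2 | h2
  · rw [Nat.add_mod]
    rw [Nat.mod_eq_of_lt h2]
    have hlt := Nat.mod_lt t h
    by_cases he : t % len + 1 = len
    · simp [he, Nat.mod_self]
    · rw [if_neg he, Nat.mod_eq_of_lt (by omega)]
  · have hl : len = 1 := by omega
    subst hl
    rw [Nat.mod_one, Nat.mod_one]
    simp

lemma pvFA_eq (m : String) (hm : m.toList ≠ []) (t : Nat) :
    pvFA m t = m.toList.getD (t % m.toList.length) ' ' := by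
  have hlen : 0 < m.toList.length := List.length_pos_iff.mpr hm
  have hlz : ((m.toList.length : Int)) ≠ 0 := by exact_mod_cast hlen.ne'
  unfold pvFA getKthCharInfinite
  rw [PySem.Str.len_eq]
  rw [show ((t : Int) + 1) = ((t + 1 : Nat) : Int) by push_cast; ring]
  simp only [PySem.Int.mod?, if_neg hlz]
  rw [Int.fmod_eq_emod, if_pos (Or.inl (by positivity : (0:Int) ≤ ((m.toList.length : Nat) : Int))), add_zero]
  rw [show ((t + 1 : Nat) : Int) % ((m.toList.length : Nat) : Int) = (((t + 1) % m.toList.length : Nat) : Int) from (Int.natCast_mod _ _).symm]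
  have hs := succ_mod t m.toList.length hlen
  simp only [Option.bind]
  by_cases h0 : (t + 1) % m.toList.length = 0
  · rw [h0]
    have hidx : ((0 : Nat) : Int) - 1 = -1 := by norm_num
    rw [hidx]
    have c1 : ¬ ((0 : Int) ≤ -1) := by norm_num
    have c2 : -((m.toList.length : Nat) : Int) ≤ -1 := by omega
    simp only [PySem.Str.pyGet?_eq, PySem.Chars.pyGet?_eq_listPyGet?, PySem.List.pyGet?,
      PySem.List.pyIdx?, if_neg c1, if_pos c2]
    have htmod : t % m.toList.length = m.toList.length - 1 := by
      by_cases he : t % m.toList.length + 1 = m.toList.length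
      · omega
      · rw [if_neg he] at hs; omega
    simp only [Option.bind]
    rw [List.getD_eq_getElem?_getD, htmod]
    norm_num
  · have hu : 1 ≤ (t + 1) % m.toList.length := by omega
    rw [show (((t + 1) % m.toList.length : Nat) : Int) - 1 = (((t + 1) % m.toList.length - 1 : Nat) : Int) by push_cast [hu]; ring]
    rw [PySem.Str.pyGet?_natCast]
    have htmod : (t + 1) % m.toList.length - 1 = t % m.toList.length := by
      by_cases he : t % m.toList.length + 1 = m.toList.length
      · rw [if_pos he] at hs; omega
      · rw [if_neg he] at hs; omega
    rw [htmod, List.getD_eq_getElem?_getD]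

lemma getD_flatten_replicate (m : List Char) (hm : 0 < m.length) :
    ∀ (q t : Nat), t < q * m.length → (List.replicate q m).flatten.getD t ' ' = m.getD (t % m.length) ' ' := by
  intro q
  induction q with
  | zero => intro t ht; simp at ht
  | succ q ih =>
    intro t ht
    rw [List.replicate_succ, List.flatten_cons]
    by_cases hlt : t < m.length
    · rw [List.getD_append _ _ _ _ hlt, Nat.mod_eq_of_lt hlt]
    · have hge : m.length ≤ t := by omega
      rw [List.getD_append_right _ _ _ _ hge]
      have hsm : (q + 1) * m.length = q * m.length + m.length := by ring
      have h2 : t - m.length < q * m.length := by omega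
      rw [ih _ h2]
      congr 1
      conv_rhs => rw [show t = m.length + (t - m.length) by omega]
      rw [Nat.add_mod_left]

lemma stream_getD (m : List Char) (hm : 0 < m.length) (n t : Nat) (ht : t < n) :
    ((List.replicate (n / m.length + 1) m).flatten.take n).getD t ' ' = m.getD (t % m.length) ' ' := by
  have hq : n < (n / m.length + 1) * m.length := (Nat.div_lt_iff_lt_mul hm).1 (Nat.lt_succ_self _)
  rw [List.getD_eq_getElem?_getD, List.getElem?_take_of_lt ht, ← List.getD_eq_getElem?_getD]
  exact getD_flatten_replicate m hm _ t (lt_trans ht hq)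

lemma flatten_map_newline : ∀ (R : List (List Char)), R ≠ [] →
    (R.map (fun r => r ++ ['\n'])).flatten = PySem.Chars.join ['\n'] R ++ ['\n'] := by
  intro R
  induction R with
  | nil => intro h; exact absurd rfl h
  | cons r R ih =>
    intro _
    cases R with
    | nil => simp [PySem.Chars.join, List.intercalate]
    | cons r2 R2 =>
      have ih' := ih (by simp)
      simp only [List.map_cons, List.flatten_cons] at ih' ⊢
      rw [ih', PySem.Chars.join_cons_cons]
      simp [List.append_assoc]

lemma stripChars_append_newline (X : List Char) :
    PySem.Chars.stripChars (X ++ ['\n']) ['\n'] = PySem.Chars.stripChars X ['\n'] := by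
  have hp : (fun c => ['\n'].contains c) '\n' = true := by decide
  have h1 : List.dropWhile (fun c => ['\n'].contains c) ['\n'] = [] := by decide
  simp only [PySem.Chars.stripChars]
  rw [List.dropWhile_append]
  by_cases he : (List.dropWhile (fun c => ['\n'].contains c) X).isEmpty = true
  · rw [if_pos he, h1]
    rw [List.isEmpty_iff] at he
    rw [he]
  · rw [if_neg he, List.reverse_append]
    have h2 : (['\n'] : List Char).reverse = ['\n'] := rfl
    rw [h2, List.singleton_append, List.dropWhile_cons, if_pos hp]

theorem patternedMessage_spec : Claim_equal_patternedMessage := by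
  unfold Claim_equal_patternedMessage
  intro message pattern _hdom hpre
  unfold Spec_patternedMessage
  show patternedMessage message pattern = patternedMessage_alt message pattern
  unfold patternedMessage patternedMessage_alt
  simp only []
  set m := PySem.Str.replace message " " "" with hmdef
  set lines := PySem.Str.splitlines pattern with hlinesdef
  set n := (lines.map (fun l => l.toList.countP (fun c => c != ' '))).sum with hndef
  set stream : List Char :=
    (if n = 0 then [] else (List.replicate (n / m.toList.length + 1) m.toList).flatten.take n) with hstreamdef
  rw [foldLinesA, foldLinesB]
  simp only [List.nil_append]
  have hcnt : pvCntL lines = n := by rw [pvCntL, hndef]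
  -- the two renderings coincide
  have hR : pvEmitLines (pvFA m) 0 lines = pvEmitLines (pvFB stream) 0 lines := by
    apply pvEmitLines_congr
    intro k _ hk
    rw [hcnt] at hk
    simp only [Nat.zero_add] at hk
    have hn : n ≠ 0 := by omega
    have hmne : m.toList ≠ [] := by
      rcases hpre with h | h
      · intro hc; exact h (by rwa [← String.toList_eq_nil_iff])
      · exfalso
        apply hn
        rw [hndef]
        apply List.sum_eq_zero
        intro x hx
        rw [List.mem_map] at hx
        obtain ⟨l, hl, rfl⟩ := hx
        rw [List.all_eq_true] at h
        have := h l hl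
        rw [List.all_eq_true] at this
        rw [List.countP_eq_zero]
        intro c hc
        have := this c hc
        simp at this ⊢
        exact this
    have hlen : 0 < m.toList.length := List.length_pos_iff.mpr hmne
    rw [pvFA_eq m hmne k, pvFB, hstreamdef, if_neg hn, stream_getD m.toList hlen n k hk]
  rw [hR]
  -- reduce to the character-list level
  rw [← String.toList_inj]
  have hnl : ("\n" : String).toList = ['\n'] := rfl
  rw [PySem.Str.toList_stripChars, PySem.Str.toList_stripChars, String.toList_ofList,
    PySem.Str.toList_join, hnl]
  rw [List.map_map]
  have hmaps : (pvEmitLines (pvFB stream) 0 lines).map (String.toList ∘ String.ofList)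
      = pvEmitLines (pvFB stream) 0 lines := by
    apply List.map_id''
    intro r; exact String.toList_ofList
  rw [hmaps]
  cases hl : lines with
  | nil => simp [pvEmitLines, PySem.Chars.join, List.intercalate]
  | cons l ls =>
    have hRne : pvEmitLines (pvFB stream) 0 (l :: ls) ≠ [] := by simp [pvEmitLines]
    rw [flatten_map_newline _ hRne, stripChars_append_newline]
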